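-- pv_equiv track=rewrite | github.com/gupta-tilak/LW_FedSSL | visualize.py | _organize_metrics
-- ===== SOURCE A (Python) =====
-- from typing import Dict, List
--
-- def _organize_metrics(metrics_list: List[Dict]) -> Dict:
--     """Organize metrics by type"""
--     organized = {
--         'round_end': [],
--         'communication': [],
--         'computation': [],
--         'aggregation': []
--     }
--
--     for metric in metrics_list:
--         event_type = metric.get('event')
--         if event_type in organized:
--             organized[event_type].append(metric)
--
--     return organized
-- ===== SOURCE B (Python) =====
-- from typing import Dict, List
--
-- def _organize_metrics(metrics_list: List[Dict]) -> Dict: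
--     """Organize metrics by type: one filtering pass per fixed event key."""
--     return {
--         k: [m for m in metrics_list if m.get('event') == k]
--         for k in ('round_end', 'communication', 'computation', 'aggregation')
--     }
-- ===== Notes on version B (the rewrite author's own statement) =====
-- stated objective: idiomatic
-- what changed: Replaced the single mutating dispatch loop over a pre-built bucket dict with a dict comprehension that, for each of the four fixed event keys, filters metrics_list for metrics whose .get('event') equals that key (four independent filtering passes instead of one bucketing pass).
import Mathlib
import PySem

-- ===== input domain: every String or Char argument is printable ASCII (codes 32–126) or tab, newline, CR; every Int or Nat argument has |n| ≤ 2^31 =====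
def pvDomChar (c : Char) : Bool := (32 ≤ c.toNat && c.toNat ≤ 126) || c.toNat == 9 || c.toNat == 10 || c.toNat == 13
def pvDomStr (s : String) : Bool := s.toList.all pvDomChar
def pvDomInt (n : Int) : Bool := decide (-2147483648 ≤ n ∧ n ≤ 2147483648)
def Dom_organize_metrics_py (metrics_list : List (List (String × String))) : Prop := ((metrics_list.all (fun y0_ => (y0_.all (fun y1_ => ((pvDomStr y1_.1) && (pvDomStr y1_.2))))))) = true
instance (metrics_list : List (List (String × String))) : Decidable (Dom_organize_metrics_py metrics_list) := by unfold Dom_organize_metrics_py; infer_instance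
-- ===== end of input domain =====

-- B replaces A's single mutating dispatch loop with one filtering pass per fixed event key (idiomatic dict comprehension).

-- ===== PORT A =====
def organize_metrics_py (metrics_list : List (List (String × String))) : List (String × List (List (String × String))) :=
  let organized : PySem.Dict String (List (List (String × String))) :=
    PySem.Dict.ofList [("round_end", []), ("communication", []), ("computation", []), ("aggregation", [])]
  let organized := metrics_list.foldl (fun org metric =>
    -- event_type = metric.get('event'); if event_type in organized: organized[event_type].append(metric)
    match (PySem.Dict.mk metric).get? "event" with
    | some et => if org.contains et then org.modify et [] (· ++ [metric]) else org
    | none => org) organized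
  organized.items

-- ===== PORT B =====
def organize_metrics_py_alt (metrics_list : List (List (String × String))) : List (String × List (List (String × String))) :=
  ["round_end", "communication", "computation", "aggregation"].map
    (fun k => (k, metrics_list.filter (fun m => (PySem.Dict.mk m).get? "event" == some k)))

-- ===== PRECONDITION & SPEC =====
def Spec_organize_metrics_py (metrics_list : List (List (String × String))) (out : List (String × List (List (String × String)))) : Prop := out = organize_metrics_py_alt metrics_list
instance (metrics_list : List (List (String × String))) (out : List (String × List (List (String × String)))) : Decidable (Spec_organize_metrics_py metrics_list out) := by unfold Spec_organize_metrics_py; infer_instance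

-- ===== CLAIM (what is proved, stated in full; the proofs are below) =====
def Claim_equal_organize_metrics_py : Prop := ∀ (metrics_list : List (List (String × String))), Dom_organize_metrics_py metrics_list → Spec_organize_metrics_py metrics_list (organize_metrics_py metrics_list)

-- ===== LEMMAS AND PROOFS =====

set_option maxRecDepth 4000

-- Invariant of A's loop: starting from the four fixed buckets with contents a b c d,
-- each bucket ends as its start ++ the metrics whose 'event' equals its key.
lemma organize_loop_inv (ml : List (List (String × String)))
    (a b c d : List (List (String × String))) :
    (ml.foldl (fun org metric =>
      match (PySem.Dict.mk metric).get? "event" with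
      | some et => if org.contains et then org.modify et [] (· ++ [metric]) else org
      | none => org)
      (PySem.Dict.mk [("round_end", a), ("communication", b), ("computation", c), ("aggregation", d)])).items
    = [("round_end", a ++ ml.filter (fun m => (PySem.Dict.mk m).get? "event" == some "round_end")),
       ("communication", b ++ ml.filter (fun m => (PySem.Dict.mk m).get? "event" == some "communication")),
       ("computation", c ++ ml.filter (fun m => (PySem.Dict.mk m).get? "event" == some "computation")),
       ("aggregation", d ++ ml.filter (fun m => (PySem.Dict.mk m).get? "event" == some "aggregation"))] := by
  induction ml generalizing a b c d with
  | nil => simp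
  | cons m rest ih =>
    simp only [List.foldl_cons, List.filter_cons]
    cases h : (PySem.Dict.mk m).get? "event" with
    | none => simp [ih]
    | some et =>
      by_cases h1 : et = "round_end"
      · subst h1
        simpa [h, PySem.Dict.contains, PySem.Dict.modify, PySem.Dict.insert,
               PySem.Dict.get?, PySem.Dict.getD] using ih (a ++ [m]) b c d
      · by_cases h2 : et = "communication"
        · subst h2
          simpa [h, PySem.Dict.contains, PySem.Dict.modify, PySem.Dict.insert,
                 PySem.Dict.get?, PySem.Dict.getD] using ih a (b ++ [m]) c d
        · by_cases h3 : et = "computation"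
          · subst h3
            simpa [h, PySem.Dict.contains, PySem.Dict.modify, PySem.Dict.insert,
                   PySem.Dict.get?, PySem.Dict.getD] using ih a b (c ++ [m]) d
          · by_cases h4 : et = "aggregation"
            · subst h4
              simpa [h, PySem.Dict.contains, PySem.Dict.modify, PySem.Dict.insert,
                     PySem.Dict.get?, PySem.Dict.getD] using ih a b c (d ++ [m])
            · have hc : (PySem.Dict.mk [("round_end", a), ("communication", b),
                  ("computation", c), ("aggregation", d)]).contains et = false := by
                simp [PySem.Dict.contains, beq_eq_false_iff_ne]
                exact ⟨fun e => h1 e.symm, fun e => h2 e.symm, fun e => h3 e.symm,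
                       fun e => h4 e.symm⟩
              simp [hc, ih, h1, h2, h3, h4]

-- ===== VERDICT (by name: the statement is the Claim_ definition above) =====
theorem organize_metrics_py_spec : Claim_equal_organize_metrics_py := by
  intro ml _hdom
  show organize_metrics_py ml = organize_metrics_py_alt ml
  unfold organize_metrics_py organize_metrics_py_alt
  simpa [PySem.Dict.ofList] using organize_loop_inv ml [] [] [] []
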